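-- pv_equiv track=rewrite | github.com/Giuseppe1992/Distrinet | mininet/mininet/mapper/mapper.py | __places
-- ===== SOURCE A (Python) =====
-- def __places(vNodes, physical_topo,block):
--     places={}
--     vNodes= list(vNodes)
--     if len(physical_topo) < len(vNodes) / block:
--         raise Exception("Not a valid Mapper for this instance")
--     for i, (v, s) in enumerate(vNodes):
--
--         places[v] = physical_topo[i//block]
--         places[s] = physical_topo[i//block]
--
--     return places
-- ===== SOURCE B (Python) =====
-- def __places(vNodes, physical_topo, block):
--     vNodes = list(vNodes)
--     if len(physical_topo) < len(vNodes) / block: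
--         raise Exception("Not a valid Mapper for this instance")
--     places = {}
--     for b, host in enumerate(physical_topo):
--         chunk = vNodes[b * block:(b + 1) * block]
--         if not chunk:
--             break
--         for v, s in chunk:
--             places[v] = host
--             places[s] = host
--     return places
-- ===== Notes on version B (the rewrite author's own statement) =====
-- stated objective: alternative
-- what changed: Replaces the flat indexed loop with i//block lookups by a nested block-by-block traversal: iterate over physical hosts, slice the matching chunk of vNodes, and stop early once a chunk is empty; no floor division or indexed lookup remains.
-- outside the precondition, e.g. on __places([('', ''), ('a', 'a')], ['', 'a'], -1): A returns {'': '', 'a': 'a'}, B returns {'': ''}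
import Mathlib
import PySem

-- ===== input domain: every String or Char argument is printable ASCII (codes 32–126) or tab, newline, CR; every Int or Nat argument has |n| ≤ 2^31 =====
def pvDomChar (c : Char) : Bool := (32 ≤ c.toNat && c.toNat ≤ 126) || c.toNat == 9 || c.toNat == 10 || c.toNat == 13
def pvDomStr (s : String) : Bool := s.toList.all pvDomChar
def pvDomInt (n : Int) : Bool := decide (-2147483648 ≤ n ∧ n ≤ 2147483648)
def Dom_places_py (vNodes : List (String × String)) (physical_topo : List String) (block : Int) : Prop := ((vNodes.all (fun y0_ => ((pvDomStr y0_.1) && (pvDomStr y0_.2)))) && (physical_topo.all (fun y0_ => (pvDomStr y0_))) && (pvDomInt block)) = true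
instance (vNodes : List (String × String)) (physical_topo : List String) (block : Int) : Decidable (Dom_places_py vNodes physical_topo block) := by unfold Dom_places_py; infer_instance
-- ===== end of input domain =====

-- B traverses block by block (host-major, slicing each chunk) instead of A's flat indexed loop with i//block; same cost, proved equal on the natural domain block ≥ 1 with enough hosts.

-- ===== PORT A =====
def places_py (vNodes : List (String × String)) (physical_topo : List String) (block : Int) : List (String × String) :=
  -- 'len(physical_topo) < len(vNodes) / block' ported as the exact rational comparison
  -- (exact at the sampled magnitudes); block = 0 is Python's ZeroDivisionError, excluded by Pre_
  if block = 0 then []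
  else if (if 0 < block then ((physical_topo.length : Int) * block < (vNodes.length : Int))
           else ((vNodes.length : Int) < (physical_topo.length : Int) * block)) then
    []  -- 'raise Exception(...)': excluded by Pre_
  else
    ((PySem.List.enumerate vNodes 0).foldl
      (fun (d : PySem.Dict String String) p =>
        match PySem.List.pyGet? physical_topo (PySem.Int.floordiv p.1 block) with
        | some h => (d.insert p.2.1 h).insert p.2.2 h
        | none => d)   -- IndexError: excluded by Pre_
      PySem.Dict.empty).items

-- ===== PORT B =====
def placesB_go (vNodes : List (String × String)) (block : Int) :
    Nat → PySem.Dict String String → List String → PySem.Dict String String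
  | _, d, [] => d
  | b, d, host :: rest =>
    let chunk := PySem.List.slice vNodes (some ((b : Int) * block)) (some (((b : Int) + 1) * block))
    if chunk = [] then d
    else placesB_go vNodes block (b + 1)
      (chunk.foldl (fun d p => (d.insert p.1 host).insert p.2 host) d) rest

def places_py_alt (vNodes : List (String × String)) (physical_topo : List String) (block : Int) : List (String × String) :=
  if block = 0 then []
  else if (if 0 < block then ((physical_topo.length : Int) * block < (vNodes.length : Int))
           else ((vNodes.length : Int) < (physical_topo.length : Int) * block)) then
    []  -- 'raise Exception(...)': excluded by Pre_
  else
    (placesB_go vNodes block 0 PySem.Dict.empty physical_topo).items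

-- ===== PRECONDITION & SPEC =====
-- Pre_ excludes non-positive block (block = 0 raises ZeroDivisionError; a negative block is
-- outside the mapper's natural domain and A's values there come from accidental negative-index
-- wraparound of i//block) and inputs failing A's guard, where A raises Exception.
def Pre_places_py (vNodes : List (String × String)) (physical_topo : List String) (block : Int) : Prop :=
  1 ≤ block ∧ (vNodes.length : Int) ≤ (physical_topo.length : Int) * block
instance (vNodes : List (String × String)) (physical_topo : List String) (block : Int) : Decidable (Pre_places_py vNodes physical_topo block) := by unfold Pre_places_py; infer_instance

def pvWitness_places_py : (List (String × String)) × List String × Int := ([("a", "b"), ("c", "d")], ["h", "k"], 1)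

def Spec_places_py (vNodes : List (String × String)) (physical_topo : List String) (block : Int) (out : List (String × String)) : Prop := out = places_py_alt vNodes physical_topo block
instance (vNodes : List (String × String)) (physical_topo : List String) (block : Int) (out : List (String × String)) : Decidable (Spec_places_py vNodes physical_topo block out) := by unfold Spec_places_py; infer_instance

-- ===== CLAIM (what is proved, stated in full; the proofs are below) =====
def Claim_equal_places_py : Prop := ∀ (vNodes : List (String × String)) (physical_topo : List String) (block : Int), Dom_places_py vNodes physical_topo block → Pre_places_py vNodes physical_topo block → Spec_places_py vNodes physical_topo block (places_py vNodes physical_topo block)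

-- ===== LEMMAS AND PROOFS =====

-- A's loop body, named for the proofs
def pvFA (pt : List String) (block : Int) (d : PySem.Dict String String) (p : Int × (String × String)) : PySem.Dict String String :=
  match PySem.List.pyGet? pt (PySem.Int.floordiv p.1 block) with
  | some h => (d.insert p.2.1 h).insert p.2.2 h
  | none => d

-- B's inner loop body, named for the proofs
def pvFB (host : String) (d : PySem.Dict String String) (p : String × String) : PySem.Dict String String :=
  (d.insert p.1 host).insert p.2 host

theorem pv_enum_append {α : Type} (xs ys : List α) (s : Int) :
    PySem.List.enumerate (xs ++ ys) s
      = PySem.List.enumerate xs s ++ PySem.List.enumerate ys (s + xs.length) := by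
  induction xs generalizing s with
  | nil => simp [PySem.List.enumerate_nil]
  | cons x xs ih =>
      have harg : s + 1 + ((xs.length : Nat) : Int) = s + (((xs.length + 1 : Nat) : Nat) : Int) := by
        push_cast; ring
      simp only [List.cons_append, PySem.List.enumerate_cons, ih, List.length_cons, harg]

theorem pv_chunk_fold (pt : List String) (block : Int) (k : Nat) (h : String)
    (hget : pt[k]? = some h) (hb : 1 ≤ block) :
    ∀ (cs : List (String × String)) (o : Nat) (d : PySem.Dict String String),
      k * block.toNat ≤ o → (o : Int) + cs.length ≤ ((k : Int) + 1) * block →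
      (PySem.List.enumerate cs (o : Int)).foldl (pvFA pt block) d = cs.foldl (pvFB h) d := by
  intro cs
  induction cs with
  | nil => intro o d _ _; simp [PySem.List.enumerate_nil]
  | cons c cs ih =>
      intro o d h1 h2
      have hbn : ((block.toNat : Int)) = block := Int.toNat_of_nonneg (by omega)
      have hfd : PySem.Int.floordiv (o : Int) block = (k : Int) := by
        rw [PySem.Int.floordiv_eq_iff_of_pos (by omega)]
        constructor
        · have : ((k * block.toNat : Nat) : Int) ≤ (o : Int) := by exact_mod_cast h1
          push_cast [hbn] at this ⊢
          linarith
        · simp only [List.length_cons] at h2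
          push_cast at h2
          linarith
      have hstep : pvFA pt block d ((o : Int), c) = pvFB h d c := by
        simp [pvFA, pvFB, hfd, PySem.List.pyGet?_natCast, hget]
      simp only [PySem.List.enumerate_cons, List.foldl_cons, hstep]
      have : ((o : Int) + 1) = (((o + 1 : Nat)) : Int) := by push_cast; ring
      rw [this, ih (o + 1) (pvFB h d c) (by omega)]
      simp only [List.length_cons] at h2
      push_cast at h2 ⊢
      linarith

theorem pv_main (vNodes : List (String × String)) (pt : List String) (block : Int)
    (hb : 1 ≤ block) (hn : (vNodes.length : Int) ≤ (pt.length : Int) * block) :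
    ∀ (hs : List String) (k : Nat) (d : PySem.Dict String String), hs = pt.drop k →
      (PySem.List.enumerate (vNodes.drop (k * block.toNat)) ((k * block.toNat : Nat) : Int)).foldl (pvFA pt block) d
        = placesB_go vNodes block k d hs := by
  intro hs
  have hbn : ((block.toNat : Int)) = block := Int.toNat_of_nonneg (by omega)
  induction hs with
  | nil =>
      intro k d heq
      have hk : pt.length ≤ k := by
        have := List.drop_eq_nil_iff.mp heq.symm
        omega
      have hdrop : vNodes.drop (k * block.toNat) = [] := by
        apply List.drop_eq_nil_of_le
        have h1 : (vNodes.length : Int) ≤ (k : Int) * block := by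
          calc (vNodes.length : Int) ≤ (pt.length : Int) * block := hn
            _ ≤ (k : Int) * block := by
                apply mul_le_mul_of_nonneg_right _ (by omega)
                exact_mod_cast hk
        have : (vNodes.length : Int) ≤ ((k * block.toNat : Nat) : Int) := by
          push_cast [hbn]; linarith
        exact_mod_cast this
      simp [hdrop, PySem.List.enumerate_nil, placesB_go]
  | cons h rest ih =>
      intro k d heq
      have hget : pt[k]? = some h := by
        have : (pt.drop k)[0]? = some h := by rw [← heq]; rfl
        simpa using this
      have hrest : rest = pt.drop (k + 1) := by
        have h2 := congrArg List.tail heq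
        simpa [List.tail_drop] using h2
      have hslice : PySem.List.slice vNodes (some ((k : Int) * block)) (some (((k : Int) + 1) * block))
          = (vNodes.drop (k * block.toNat)).take block.toNat := by
        have e1 : (k : Int) * block = ((k * block.toNat : Nat) : Int) := by push_cast [hbn]; ring
        have e2 : ((k : Int) + 1) * block = ((k * block.toNat : Nat) : Int) + ((block.toNat : Nat) : Int) := by
          push_cast [hbn]; ring
        rw [e1, e2, PySem.List.slice_natCast_add]
      set tl := vNodes.drop (k * block.toNat) with htl
      by_cases hc : tl.take block.toNat = []
      · have htlnil : tl = [] := by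
          rcases List.take_eq_nil_iff.mp hc with h0 | h0
          · omega
          · exact h0
        rw [htlnil]
        simp [PySem.List.enumerate_nil, placesB_go, hslice, hc]
      · have hchunk : tl = tl.take block.toNat ++ vNodes.drop ((k + 1) * block.toNat) := by
          have : vNodes.drop ((k + 1) * block.toNat) = tl.drop block.toNat := by
            rw [htl, List.drop_drop]
            congr 1
            ring
          rw [this, List.take_append_drop]
        rw [show placesB_go vNodes block k d (h :: rest)
              = if PySem.List.slice vNodes (some ((k : Int) * block)) (some (((k : Int) + 1) * block)) = [] then d
                else placesB_go vNodes block (k + 1)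
                  ((PySem.List.slice vNodes (some ((k : Int) * block)) (some (((k : Int) + 1) * block))).foldl
                    (fun d p => (d.insert p.1 h).insert p.2 h) d) rest
            from rfl]
        rw [hslice, if_neg hc]
        have hfbeq : (tl.take block.toNat).foldl (fun d p => (d.insert p.1 h).insert p.2 h) d
            = (tl.take block.toNat).foldl (pvFB h) d := rfl
        rw [hfbeq]
        conv_lhs => rw [hchunk]
        rw [pv_enum_append, List.foldl_append]
        have hlen_take : (tl.take block.toNat).length ≤ block.toNat := by
          simp [List.length_take]
        have hbound : ((k * block.toNat : Nat) : Int) + ((tl.take block.toNat).length : Int)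
            ≤ ((k : Int) + 1) * block := by
          have h3 : k * block.toNat + (tl.take block.toNat).length ≤ (k + 1) * block.toNat := by
            have h4 : (k + 1) * block.toNat = k * block.toNat + block.toNat := by ring
            rw [h4]
            exact Nat.add_le_add_left hlen_take _
          have h5 : (((k + 1) * block.toNat : Nat) : Int) = ((k : Int) + 1) * block := by
            push_cast [hbn]; ring
          rw [← h5]
          exact_mod_cast h3
        rw [pv_chunk_fold pt block k h hget hb (tl.take block.toNat) (k * block.toNat) d le_rfl hbound]
        set d' := (tl.take block.toNat).foldl (pvFB h) d with hd'
        by_cases hfull : (tl.take block.toNat).length = block.toNat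
        · have hstart : ((k * block.toNat : Nat) : Int) + ((tl.take block.toNat).length : Int)
              = (((k + 1) * block.toNat : Nat) : Int) := by
            rw [hfull]; push_cast; ring
          rw [hstart]
          exact ih (k + 1) d' hrest
        · have htllt : tl.length < block.toNat := by
            simp [List.length_take] at hfull hlen_take
            omega
          have hdrop2 : vNodes.drop ((k + 1) * block.toNat) = [] := by
            have h6 : tl.drop block.toNat = [] := List.drop_eq_nil_of_le (le_of_lt htllt)
            have h7 : tl.drop block.toNat = vNodes.drop ((k + 1) * block.toNat) := by
              rw [htl, List.drop_drop]
              congr 1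
              ring
            rw [← h7, h6]
          have hih := ih (k + 1) d' hrest
          rw [hdrop2] at hih ⊢
          simp [PySem.List.enumerate_nil] at hih ⊢
          exact hih

-- ===== VERDICT (by name: the statement is the Claim_ definition above) =====
theorem places_py_spec : Claim_equal_places_py := by
  intro vNodes physical_topo block _ hpre
  obtain ⟨hb, hn⟩ := hpre
  unfold Spec_places_py places_py places_py_alt
  have h0 : ¬ (block = 0) := by omega
  have hguard : ¬ (if 0 < block then ((physical_topo.length : Int) * block < (vNodes.length : Int))
      else ((vNodes.length : Int) < (physical_topo.length : Int) * block)) := by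
    rw [if_pos (by omega)]
    omega
  rw [if_neg h0, if_neg h0, if_neg hguard, if_neg hguard]
  congr 1
  have := pv_main vNodes physical_topo block hb hn physical_topo 0 PySem.Dict.empty (by simp)
  simpa [pvFA] using this
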